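-- pv_equiv track=rewrite | github.com/gobbleyourdong/tsunami | tsunami/progress.py | _count_in_window
-- ===== SOURCE A (Python) =====
-- from typing import Iterable
--
-- def _count_in_window(
--     history: list[str],
--     tools: Iterable[str],
--     window: int | None = None,
-- ) -> int:
--     """Count occurrences of any `tools` in the last `window` entries of
--     `history`. `window=None` means the whole history.
--     """
--     recent = history[-window:] if window is not None else history
--     target = set(tools)
--     return sum(1 for t in recent if t in target)
-- ===== SOURCE B (Python) =====
-- def _count_in_window(history, tools, window=None):
--     recent = history if window is None else history[-window:]
--     counts = {}
--     for t in recent: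
--         counts[t] = counts.get(t, 0) + 1
--     return sum(counts.get(t, 0) for t in set(tools))
-- ===== Notes on version B (the rewrite author's own statement) =====
-- stated objective: alternative
-- what changed: Instead of filtering the window by set membership and summing 1s, B tallies the window into a frequency dictionary in one pass and then sums the per-tool tallies over the distinct tools; the Lean port realises both stages as structural recursions (tally, lookup-sum) rather than A's filter/map/sum pipeline.
import Mathlib
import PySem

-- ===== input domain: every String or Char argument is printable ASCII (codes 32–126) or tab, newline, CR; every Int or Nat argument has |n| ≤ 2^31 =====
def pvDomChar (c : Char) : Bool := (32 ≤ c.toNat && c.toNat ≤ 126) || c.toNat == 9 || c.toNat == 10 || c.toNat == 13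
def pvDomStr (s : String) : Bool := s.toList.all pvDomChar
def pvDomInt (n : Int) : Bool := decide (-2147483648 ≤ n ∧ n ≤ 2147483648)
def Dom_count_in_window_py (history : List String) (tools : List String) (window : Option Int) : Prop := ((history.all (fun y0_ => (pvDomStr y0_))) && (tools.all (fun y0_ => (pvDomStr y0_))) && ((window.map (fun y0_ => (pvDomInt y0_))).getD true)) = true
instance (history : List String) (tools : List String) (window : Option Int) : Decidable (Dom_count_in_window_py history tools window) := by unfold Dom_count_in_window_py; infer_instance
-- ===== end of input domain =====

-- B tallies the window into a frequency dictionary in one pass and sums the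
-- per-tool tallies over the distinct tools (alternative decomposition, same cost).

-- ===== PORT A =====
def count_in_window_py (history : List String) (tools : List String) (window : Option Int) : Int :=
  let recent := match window with
    | some w => PySem.List.slice history (some (-w)) none
    | none => history
  let target := PySem.Set.ofList tools
  ((recent.filter (fun t => PySem.Set.contains target t)).map (fun _ => (1 : Int))).sum

-- ===== PORT B =====
-- B-side helpers: the tally loop and the lookup-sum, as structural recursions
def pvTally : List String → PySem.Dict String Int → PySem.Dict String Int
  | [], d => d
  | t :: rest, d => pvTally rest (d.insert t (d.getD t 0 + 1))

def pvLookupSum (d : PySem.Dict String Int) : List String → Int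
  | [] => 0
  | t :: ts => d.getD t 0 + pvLookupSum d ts

def count_in_window_py_alt (history : List String) (tools : List String) (window : Option Int) : Int :=
  let recent := match window with
    | none => history
    | some w => PySem.List.slice history (some (-w)) none
  pvLookupSum (pvTally recent PySem.Dict.empty) (PySem.Set.ofList tools)

-- ===== PRECONDITION & SPEC =====
def Spec_count_in_window_py (history : List String) (tools : List String) (window : Option Int) (out : Int) : Prop := out = count_in_window_py_alt history tools window
instance (history : List String) (tools : List String) (window : Option Int) (out : Int) : Decidable (Spec_count_in_window_py history tools window out) := by unfold Spec_count_in_window_py; infer_instance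

-- ===== CLAIM (what is proved, stated in full; the proofs are below) =====
def Claim_equal_count_in_window_py : Prop := ∀ (history : List String) (tools : List String) (window : Option Int), Dom_count_in_window_py history tools window → Spec_count_in_window_py history tools window (count_in_window_py history tools window)

-- ===== LEMMAS AND PROOFS =====

-- Σ_{t ∈ ts} [t = r] = [r ∈ ts], for ts without duplicates
lemma pv_sum_indicator (r : String) (ts : List String) (h : ts.Nodup) :
    (ts.map (fun t => if r == t then (1 : Int) else 0)).sum
      = if r ∈ ts then 1 else 0 := by
  induction ts with
  | nil => simp
  | cons a ts ih =>
    rw [List.nodup_cons] at h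
    obtain ⟨ha, hn⟩ := h
    simp only [List.map_cons, List.sum_cons, List.mem_cons, ih hn]
    by_cases hr : r = a
    · subst hr
      simp [ha]
    · have : (r == a) = false := by simp [hr]
      simp [this, hr]

-- Σ_{t ∈ ts} count t recent = countP (· ∈ ts) recent, for ts without duplicates
lemma pv_sum_count (recent ts : List String) (h : ts.Nodup) :
    (ts.map (fun t => (recent.count t : Int))).sum
      = ((recent.countP (fun x => decide (x ∈ ts)) : Nat) : Int) := by
  induction recent with
  | nil => simp
  | cons r rest ih =>
    have hsplit :
        (ts.map (fun t => ((r :: rest).count t : Int))).sum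
          = (ts.map (fun t => (rest.count t : Int))).sum
            + (ts.map (fun t => if r == t then (1 : Int) else 0)).sum := by
      rw [← List.sum_map_add]
      apply congrArg List.sum
      apply List.map_congr_left
      intro t _
      rw [List.count_cons]
      push_cast
      split <;> simp
    rw [hsplit, ih, pv_sum_indicator r ts h, List.countP_cons]
    by_cases hr : r ∈ ts <;> simp [hr]

lemma pv_tally_eq (l : List String) (d : PySem.Dict String Int) :
    pvTally l d = l.foldl (fun d t => d.insert t (d.getD t 0 + 1)) d := by
  induction l generalizing d with
  | nil => rfl
  | cons t rest ih => simp [pvTally, List.foldl_cons, ih]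

lemma pv_lookupSum_eq (d : PySem.Dict String Int) (ts : List String) :
    pvLookupSum d ts = (ts.map (fun t => d.getD t 0)).sum := by
  induction ts with
  | nil => rfl
  | cons t ts ih => simp [pvLookupSum, ih]

lemma pv_core (recent ts : List String) :
    ((recent.filter (fun t => PySem.Set.contains (PySem.Set.ofList ts) t)).map
        (fun _ => (1 : Int))).sum
      = pvLookupSum (pvTally recent PySem.Dict.empty) (PySem.Set.ofList ts) := by
  rw [pv_lookupSum_eq, pv_tally_eq, PySem.Dict.foldl_insert_getD_add_one_eq_counter]
  have hB : ((PySem.Set.ofList ts).map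
      (fun t => (PySem.Dict.counter recent).getD t 0)).sum
        = ((PySem.Set.ofList ts).map (fun t => (recent.count t : Int))).sum := by
    apply congrArg List.sum
    apply List.map_congr_left
    intro t _
    simp [PySem.Dict.getD_counter]
  rw [hB, pv_sum_count recent _ (PySem.Set.nodup_ofList ts)]
  have hA : (recent.filter (fun t => PySem.Set.contains (PySem.Set.ofList ts) t))
      = recent.filter (fun x => decide (x ∈ PySem.Set.ofList ts)) := by
    apply List.filter_congr
    intro x _
    simp
  rw [hA, List.map_const', List.sum_replicate]
  simp [List.countP_eq_length_filter]

-- ===== VERDICT (by name: the statement is the Claim_ definition above) =====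
theorem count_in_window_py_spec : Claim_equal_count_in_window_py := by
  intro history tools window _
  unfold Spec_count_in_window_py count_in_window_py count_in_window_py_alt
  cases window with
  | none => exact pv_core history tools
  | some w => exact pv_core (PySem.List.slice history (some (-w)) none) tools
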